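-- pv_equiv track=rewrite | github.com/Alexandre071404/Puzzle_Quest | jeux.py | combinaison_de_matrice
-- ===== SOURCE A (Python) =====
-- def horizontal(matrice):#crée une matrice composer de 0 et de 1 avec sachant que 0 signifie qu'il y a des boules aligné en horizontal
--         Boule_Testee=matrice[0][0]
--         coordonee_Boule_Teste=[0,0]
--         liste_effet=[]
--         matrice_test=[[1 for i in range (len(matrice[0]))]for j in range (len(matrice))]#crée une matrice pleine de 1
--         for i in range(len(matrice)):
--                 Nb_Boules_Identiques=0
--                 for j in range(len(matrice[i])):
--                         if Boule_Testee==matrice[i][j]: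
--                                 Nb_Boules_Identiques=Nb_Boules_Identiques+1
--                                 if j==len(matrice[i])-1:#vérifie si malgré le saut de ligne il y a un alignement
--                                         if Nb_Boules_Identiques>=3:
--                                                 liste_effet.append((Boule_Testee,Nb_Boules_Identiques))#ajoute a liste effet Boule_Testee et Nb_Boules_Identiques qui vont permettre de faire des dégats,de soigner,de se protéger.
--                                                 for k in range(Nb_Boules_Identiques):
--                                                         matrice_test[i][j-k]=0
--                         else:
--                                 if Nb_Boules_Identiques>=3:
--                                         liste_effet.append((Boule_Testee,Nb_Boules_Identiques))#ajoute a liste effet Boule_Testee et Nb_Boules_Identiques qui vont permettre de faire des dégats,de soigner,de se protéger.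
--                                         for k in range(Nb_Boules_Identiques):
--                                                 matrice_test[i][j-k-1]=0
--                                 Nb_Boules_Identiques=1
--                                 Boule_Testee=matrice[i][j]
--                                 coordonee_Boule_Teste=[i,j]
--         return(matrice_test,liste_effet)
--
-- def vertical(matrice):#crée une matrice composer de 0 et de 1 avec sachant que 0 signifie qu'il y a des boules aligné en vertical
--     Boule_Testee=matrice[0][0]
--     coordonee_Boule_Teste=[0,0]
--     liste_effet=[]
--     matrice_test=[[1 for i in range (len(matrice[0]))]for j in range (len(matrice))]
--     for i in range(len(matrice[0])):
--         Nb_Boules_Identiques=0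
--         for j in range(len(matrice)):
--             if Boule_Testee==matrice[j][i]:
--                 Nb_Boules_Identiques=Nb_Boules_Identiques+1
--                 if j==len(matrice)-1:
--                         if Nb_Boules_Identiques>=3:
--                                 liste_effet.append((Boule_Testee,Nb_Boules_Identiques))
--                                 for k in range(Nb_Boules_Identiques):
--                                         matrice_test[j-k][i]=0
--             else:
--                 if Nb_Boules_Identiques>=3:
--                     liste_effet.append((Boule_Testee,Nb_Boules_Identiques))#ajoute a liste effet Boule_Testee et Nb_Boules_Identiques qui vont permettre de faire des dégats,de soigner,de se protéger.
--                     for k in range(Nb_Boules_Identiques):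
--                         matrice_test[j-k-1][i]=0
--                 Nb_Boules_Identiques=1
--                 Boule_Testee=matrice[j][i]
--                 coordonee_Boule_Teste=[j,i]
--     return(matrice_test,liste_effet)
--
-- def combinaison_de_matrice(matrice):#crée une combinaison entre la matrice vertical et horizontal et aussi des liste_effet de chaque fonctions
--         matrice_test_horizontal=horizontal(matrice)
--         matrice_test_vertical=vertical(matrice)
--         liste_effet=matrice_test_horizontal[1]+matrice_test_vertical[1]#crée la liste d'effet compléte
--         for i in range(len(matrice)):
--                 for j in range(len(matrice[i])):
--                         matrice[i][j]=matrice[i][j]*matrice_test_horizontal[0][i][j]*matrice_test_vertical[0][i][j]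
--         return(matrice,liste_effet)
-- ===== SOURCE B (Python) =====
-- # B: run-length-encode each row and each column once; effects are the runs of
-- # length >= 3, and cells inside such runs are zeroed in place (same matrice
-- # object mutated, same return value).
-- def combinaison_de_matrice(matrice):
--     def runs(line):
--         res = []
--         for x in line:
--             if res and res[-1][0] == x:
--                 res[-1] = (res[-1][0], res[-1][1] + 1)
--             else:
--                 res.append((x, 1))
--         return res
--
--     def effets(lines):
--         return [(v, n) for line in lines for (v, n) in runs(line) if n >= 3]
--
--     def keep(line):
--         return [n < 3 for (v, n) in runs(line) for _ in range(n)]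
--
--     n = len(matrice[0])
--     cols = [[row[i] for row in matrice] for i in range(n)]
--     liste_effet = effets(matrice) + effets(cols)
--     keep_h = [keep(row) for row in matrice]
--     keep_v = [keep(col) for col in cols]
--     matrice[:] = [[(matrice[i][j] if keep_h[i][j] and keep_v[j][i] else 0)
--                    for j in range(len(matrice[i]))]
--                   for i in range(len(matrice))]
--     return (matrice, liste_effet)
-- ===== Notes on version B (the rewrite author's own statement) =====
-- stated objective: simpler
-- what changed: B replaces A's two full 0/1 mask matrices built by index-juggling stateful scans (with a carried 'Boule_Testee' across rows/columns) plus a third multiplication pass by run-length-encoding each row and each column once, deriving the effect list and boolean keep-masks from the runs, and rebuilding/zeroing the matrix in one comprehension.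
import Mathlib
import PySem

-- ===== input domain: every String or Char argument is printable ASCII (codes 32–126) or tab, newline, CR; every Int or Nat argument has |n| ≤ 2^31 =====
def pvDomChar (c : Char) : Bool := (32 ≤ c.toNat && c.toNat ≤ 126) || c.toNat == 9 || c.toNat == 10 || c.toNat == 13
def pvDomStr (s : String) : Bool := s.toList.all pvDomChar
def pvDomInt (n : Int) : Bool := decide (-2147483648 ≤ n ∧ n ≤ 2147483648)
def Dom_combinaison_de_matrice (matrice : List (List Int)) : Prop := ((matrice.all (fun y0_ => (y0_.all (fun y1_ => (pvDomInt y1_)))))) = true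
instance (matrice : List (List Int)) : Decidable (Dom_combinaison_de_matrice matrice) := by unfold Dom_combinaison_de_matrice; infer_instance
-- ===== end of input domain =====

-- B re-implements A by run-length-encoding each row and column once (objective: simpler);
-- both Pythons mutate `matrice` in place the same way, the theorems are about the return value.

-- ===== PORT A =====
-- matrice_test[x][y] = 0  (indices are in range on every input Pre_ admits)
def pvSetCell (mt : List (List Int)) (x y : Nat) : List (List Int) :=
  mt.set x ((mt.getD x []).set y 0)

-- inner loop of `horizontal` over the remaining cells of row i; j = current column,
-- n = len(matrice[i]); state (Boule_Testee, Nb_Boules_Identiques, matrice_test, liste_effet)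
def pvHRow (i : Nat) : List Int → Nat → Nat → Int → Nat → List (List Int) → List (Int × Int) →
    Int × List (List Int) × List (Int × Int)
  | [], _, _, bt, _, mt, eff => (bt, mt, eff)
  | c :: rest, j, n, bt, nb, mt, eff =>
    if bt == c then
      if j == n - 1 then
        if 3 ≤ nb + 1 then
          pvHRow i rest (j + 1) n bt (nb + 1)
            ((List.range (nb + 1)).foldl (fun acc k => pvSetCell acc i (j - k)) mt)
            (eff ++ [(bt, ((nb : Int) + 1))])
        else pvHRow i rest (j + 1) n bt (nb + 1) mt eff
      else pvHRow i rest (j + 1) n bt (nb + 1) mt eff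
    else
      if 3 ≤ nb then
        pvHRow i rest (j + 1) n c 1
          ((List.range nb).foldl (fun acc k => pvSetCell acc i (j - k - 1)) mt)
          (eff ++ [(bt, (nb : Int))])
      else pvHRow i rest (j + 1) n c 1 mt eff

-- outer loop of `horizontal` over the rows, i = current row index
def pvHRows : List (List Int) → Nat → Int → List (List Int) → List (Int × Int) →
    Int × List (List Int) × List (Int × Int)
  | [], _, bt, mt, eff => (bt, mt, eff)
  | r :: rs, i, bt, mt, eff =>
    match pvHRow i r 0 r.length bt 0 mt eff with
    | (bt', mt', eff') => pvHRows rs (i + 1) bt' mt' eff'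

def pvHorizontal (matrice : List (List Int)) : List (List Int) × List (Int × Int) :=
  let bt0 := (matrice.headD []).headD 0      -- matrice[0][0]; in range on Pre_
  let mt0 := List.replicate matrice.length (List.replicate (matrice.headD []).length 1)
  match pvHRows matrice 0 bt0 mt0 [] with
  | (_, mt, eff) => (mt, eff)

-- inner loop of `vertical` over the remaining rows in column i; j = current row, nrows = len(matrice)
def pvVCol (i : Nat) : List (List Int) → Nat → Nat → Int → Nat → List (List Int) → List (Int × Int) →
    Int × List (List Int) × List (Int × Int)
  | [], _, _, bt, _, mt, eff => (bt, mt, eff)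
  | r :: rest, j, nrows, bt, nb, mt, eff =>
    let c := r.getD i 0                       -- matrice[j][i]; in range on Pre_
    if bt == c then
      if j == nrows - 1 then
        if 3 ≤ nb + 1 then
          pvVCol i rest (j + 1) nrows bt (nb + 1)
            ((List.range (nb + 1)).foldl (fun acc k => pvSetCell acc (j - k) i) mt)
            (eff ++ [(bt, ((nb : Int) + 1))])
        else pvVCol i rest (j + 1) nrows bt (nb + 1) mt eff
      else pvVCol i rest (j + 1) nrows bt (nb + 1) mt eff
    else
      if 3 ≤ nb then
        pvVCol i rest (j + 1) nrows c 1
          ((List.range nb).foldl (fun acc k => pvSetCell acc (j - k - 1) i) mt)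
          (eff ++ [(bt, (nb : Int))])
      else pvVCol i rest (j + 1) nrows c 1 mt eff

-- outer loop of `vertical` over the columns: cnt columns remain, i = current column index
def pvVCols (matrice : List (List Int)) : Nat → Nat → Int → List (List Int) → List (Int × Int) →
    Int × List (List Int) × List (Int × Int)
  | 0, _, bt, mt, eff => (bt, mt, eff)
  | cnt + 1, i, bt, mt, eff =>
    match pvVCol i matrice 0 matrice.length bt 0 mt eff with
    | (bt', mt', eff') => pvVCols matrice cnt (i + 1) bt' mt' eff'

def pvVertical (matrice : List (List Int)) : List (List Int) × List (Int × Int) :=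
  let bt0 := (matrice.headD []).headD 0
  let mt0 := List.replicate matrice.length (List.replicate (matrice.headD []).length 1)
  match pvVCols matrice (matrice.headD []).length 0 bt0 mt0 [] with
  | (_, mt, eff) => (mt, eff)

def combinaison_de_matrice (matrice : List (List Int)) : List (List Int) × (List (Int × Int)) :=
  let h := pvHorizontal matrice
  let v := pvVertical matrice
  let eff := h.2 ++ v.2
  -- in-place update loop: matrice[i][j] = matrice[i][j] * h[0][i][j] * v[0][i][j]
  let final := (List.range matrice.length).foldl (fun acc i =>
    (List.range ((acc.getD i []).length)).foldl (fun a2 j =>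
      a2.set i ((a2.getD i []).set j
        (((a2.getD i []).getD j 0) * ((h.1.getD i []).getD j 0) * ((v.1.getD i []).getD j 0)))) acc)
    matrice
  (final, eff)

-- ===== PORT B =====
-- run-length encoding: res[-1] update ↔ head of the reversed accumulator
def pvRunsStep (acc : List (Int × Nat)) (x : Int) : List (Int × Nat) :=
  match acc with
  | (c, s) :: t => if c == x then (c, s + 1) :: t else (x, 1) :: (c, s) :: t
  | [] => [(x, 1)]

def pvRuns (line : List Int) : List (Int × Nat) := (line.foldl pvRunsStep []).reverse

def pvEffets (lines : List (List Int)) : List (Int × Int) :=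
  lines.flatMap (fun l => ((pvRuns l).filter (fun p => 3 ≤ p.2)).map (fun p => (p.1, (p.2 : Int))))

def pvKeep (line : List Int) : List Bool :=
  (pvRuns line).flatMap (fun p => List.replicate p.2 (decide (p.2 < 3)))

def combinaison_de_matrice_alt (matrice : List (List Int)) : List (List Int) × (List (Int × Int)) :=
  let n := (matrice.headD []).length                  -- len(matrice[0]); nonempty on Pre_
  let cols := (List.range n).map (fun i => matrice.map (fun row => row.getD i 0))
  let eff := pvEffets matrice ++ pvEffets cols
  let kh := matrice.map pvKeep
  let kv := cols.map pvKeep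
  let out := (List.range matrice.length).map (fun i =>
    (List.range ((matrice.getD i []).length)).map (fun j =>
      if ((kh.getD i []).getD j true) && ((kv.getD j []).getD i true)
      then (matrice.getD i []).getD j 0 else 0))
  (out, eff)

-- ===== PRECONDITION & SPEC =====
-- Pre_ excludes exactly the inputs on which the Python A raises IndexError:
-- the empty matrix, an empty first row, and non-rectangular matrices.
def Pre_combinaison_de_matrice (matrice : List (List Int)) : Prop :=
  matrice ≠ [] ∧ (matrice.headD []) ≠ [] ∧
    ∀ r ∈ matrice, r.length = (matrice.headD []).length
instance (matrice : List (List Int)) : Decidable (Pre_combinaison_de_matrice matrice) := by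
  unfold Pre_combinaison_de_matrice; infer_instance

def pvWitness_combinaison_de_matrice : List (List Int) := [[1, 1, 1], [0, 2, 1]]

def Spec_combinaison_de_matrice (matrice : List (List Int)) (out : List (List Int) × (List (Int × Int))) : Prop := out = combinaison_de_matrice_alt matrice
instance (matrice : List (List Int)) (out : List (List Int) × (List (Int × Int))) : Decidable (Spec_combinaison_de_matrice matrice out) := by unfold Spec_combinaison_de_matrice; infer_instance

-- ===== CLAIM (what is proved, stated in full; the proofs are below) =====
def Claim_equal_combinaison_de_matrice : Prop := ∀ (matrice : List (List Int)), Dom_combinaison_de_matrice matrice → Pre_combinaison_de_matrice matrice → Spec_combinaison_de_matrice matrice (combinaison_de_matrice matrice)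

-- ===== LEMMAS AND PROOFS =====

/- ---------- proof-side definitions ---------- -/

-- run-length encoding of c^s ++ xs, given a pending run (c, s)
def mRuns : Int → Nat → List Int → List (Int × Nat)
  | c, s, [] => [(c, s)]
  | c, s, x :: xs => if c == x then mRuns c (s + 1) xs else (c, s) :: mRuns x 1 xs

def effOf (R : List (Int × Nat)) : List (Int × Int) :=
  (R.filter (fun p => 3 ≤ p.2)).map (fun p => (p.1, (p.2 : Int)))

def sumLens (R : List (Int × Nat)) : Nat := (R.map Prod.snd).sum

def maskRow (R : List (Int × Nat)) : List Int :=
  R.flatMap (fun p => List.replicate p.2 (if 3 ≤ p.2 then (0 : Int) else 1))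

-- matrix-level zeroing of the horizontal flush loop: row i, positions off+L-1 … off
def zeroSeg (mt : List (List Int)) (i off L : Nat) : List (List Int) :=
  (List.range L).foldl (fun acc k => pvSetCell acc i (off + L - 1 - k)) mt

def appRuns (i : Nat) : Nat → List (Int × Nat) → List (List Int) → List (List Int)
  | _, [], mt => mt
  | off, (_, s) :: rs, mt => appRuns i (off + s) rs (if 3 ≤ s then zeroSeg mt i off s else mt)

def zeroSegRow (row : List Int) (off L : Nat) : List Int :=
  (List.range L).foldl (fun r k => r.set (off + L - 1 - k) 0) row

def appRunsRow : List Int → Nat → List (Int × Nat) → List Int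
  | row, _, [] => row
  | row, off, (_, s) :: rs => appRunsRow (if 3 ≤ s then zeroSegRow row off s else row) (off + s) rs

-- transpose of an X×w matrix (w = width to read)
def Tr (X : List (List Int)) (w : Nat) : List (List Int) :=
  (List.range w).map (fun c => X.map (fun row => row.getD c 0))

/- ---------- run-length encoding lemmas ---------- -/

theorem runs_foldl (xs : List Int) : ∀ (c : Int) (s : Nat) (t : List (Int × Nat)),
    (xs.foldl pvRunsStep ((c, s) :: t)).reverse = t.reverse ++ mRuns c s xs := by
  induction xs with
  | nil => intro c s t; simp [mRuns]
  | cons x xs ih =>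
    intro c s t
    by_cases hc : c = x
    · subst hc
      simp only [List.foldl_cons, pvRunsStep, beq_self_eq_true, if_true, mRuns]
      exact ih c (s + 1) t
    · have hb : (c == x) = false := by simp [hc]
      simp only [List.foldl_cons, pvRunsStep, hb, Bool.false_eq_true, if_false, mRuns]
      rw [ih x 1 ((c, s) :: t)]
      simp

theorem pvRuns_cons (x : Int) (xs : List Int) : pvRuns (x :: xs) = mRuns x 1 xs := by
  have := runs_foldl xs x 1 []
  simpa [pvRuns, pvRunsStep] using this

theorem sumLens_mRuns (xs : List Int) : ∀ c s, sumLens (mRuns c s xs) = s + xs.length := by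
  induction xs with
  | nil => intro c s; simp [mRuns, sumLens]
  | cons x xs ih =>
    intro c s
    by_cases hc : c = x
    · subst hc; simp only [mRuns, beq_self_eq_true, if_true]
      rw [ih]; simp only [List.length_cons]; omega
    · have hb : (c == x) = false := by simp [hc]
      simp only [mRuns, hb, Bool.false_eq_true, if_false]
      have hcons : sumLens ((c, s) :: mRuns x 1 xs) = s + sumLens (mRuns x 1 xs) := by
        simp [sumLens]
      rw [hcons, ih]; simp only [List.length_cons]; omega

theorem sumLens_pvRuns (r : List Int) : sumLens (pvRuns r) = r.length := by
  cases r with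
  | nil => simp [pvRuns, sumLens]
  | cons x xs => rw [pvRuns_cons, sumLens_mRuns]; simp only [List.length_cons]; omega

theorem length_maskRow (R : List (Int × Nat)) : (maskRow R).length = sumLens R := by
  induction R with
  | nil => simp [maskRow, sumLens]
  | cons p R ih => simp [maskRow, sumLens] at ih ⊢; try omega

theorem length_pvKeep (r : List Int) : (pvKeep r).length = r.length := by
  have h1 : ∀ R : List (Int × Nat),
      (R.flatMap (fun p => List.replicate p.2 (decide (p.2 < 3)))).length = sumLens R := by
    intro R
    induction R with
    | nil => simp [sumLens]
    | cons p R ih => simp [sumLens] at ih ⊢; try omega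
  have : (pvKeep r).length = sumLens (pvRuns r) := h1 (pvRuns r)
  rw [this, sumLens_pvRuns]

theorem maskRow_eq_keep (R : List (Int × Nat)) :
    maskRow R = (R.flatMap (fun p => List.replicate p.2 (decide (p.2 < 3)))).map
      (fun b => if b then (1 : Int) else 0) := by
  induction R with
  | nil => simp [maskRow]
  | cons p R ih =>
    simp only [maskRow, List.flatMap_cons, List.map_append] at ih ⊢
    rw [← ih]
    congr 1
    simp only [List.map_replicate]
    congr 1
    by_cases h : 3 ≤ p.2
    · simp [h, Nat.not_lt.mpr h]
    · simp [h, Nat.lt_of_not_le h]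

/- ---------- generic list helpers ---------- -/

theorem getD_set {α : Type} (l : List α) (i : Nat) (v : α) (r : Nat) (d : α) :
    (l.set i v).getD r d = if r = i ∧ i < l.length then v else l.getD r d := by
  by_cases hi : i < l.length
  · by_cases hr : r = i
    · subst hr; simp [List.getD_eq_getElem?_getD, List.getElem?_set, hi]
    · simp [List.getD_eq_getElem?_getD, List.getElem?_set, Ne.symm hr, hr, hi]
  · have hs : l.set i v = l := List.set_eq_of_length_le (by omega)
    simp [hs, hi]


theorem set_getD_self {α : Type} (l : List α) (i : Nat) (d : α) (hi : i < l.length) :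
    l.set i (l.getD i d) = l := by
  apply List.ext_getElem (by simp)
  intro k hk1 hk2
  rw [List.getElem_set]
  split
  · next heq => subst heq; simp [List.getD_eq_getElem?_getD, List.getElem?_eq_getElem hi]
  · rfl

-- a fold whose body only rewrites row i localises to that row
theorem foldl_set_row {β : Type} (ks : List β) (h : List Int → β → List Int) :
    ∀ (mt : List (List Int)) (i : Nat), i < mt.length →
    ks.foldl (fun a k => a.set i (h (a.getD i []) k)) mt = mt.set i (ks.foldl h (mt.getD i [])) := by
  induction ks with
  | nil => intro mt i hi; simp only [List.foldl_nil]; exact (set_getD_self mt i [] hi).symm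
  | cons k ks ih =>
    intro mt i hi
    simp only [List.foldl_cons]
    rw [ih _ i (by simpa using hi)]
    rw [List.set_set]
    congr 1
    rw [getD_set]
    simp [hi]

theorem zeroSeg_set (mt : List (List Int)) (i off L : Nat) (hi : i < mt.length) :
    zeroSeg mt i off L = mt.set i (zeroSegRow (mt.getD i []) off L) := by
  simp only [zeroSeg, zeroSegRow, pvSetCell]
  exact foldl_set_row (List.range L) (fun r k => r.set (off + L - 1 - k) 0) mt i hi

theorem appRuns_set (R : List (Int × Nat)) : ∀ (off : Nat) (mt : List (List Int)) (i : Nat),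
    i < mt.length → appRuns i off R mt = mt.set i (appRunsRow (mt.getD i []) off R) := by
  induction R with
  | nil =>
    intro off mt i hi
    simp only [appRuns, appRunsRow]
    exact (set_getD_self mt i [] hi).symm
  | cons p rs ih =>
    intro off mt i hi
    obtain ⟨v, s⟩ := p
    by_cases h3 : 3 ≤ s
    · simp only [appRuns, appRunsRow, h3, if_true]
      rw [zeroSeg_set mt i off s hi]
      rw [ih (off + s) _ i (by simp [hi])]
      rw [List.set_set]
      congr 2
      rw [getD_set]
      simp [hi]
    · simp only [appRuns, appRunsRow, h3, if_false]
      exact ih (off + s) mt i hi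

theorem zeroSegRow_succ (row : List Int) (off L : Nat) :
    zeroSegRow row off (L + 1) = (zeroSegRow row (off + 1) L).set off 0 := by
  have hf : (fun (r : List Int) (k : Nat) => r.set (off + (L + 1) - 1 - k) 0)
      = (fun (r : List Int) (k : Nat) => r.set (off + 1 + L - 1 - k) 0) := by
    funext r k; congr 2; omega
  simp only [zeroSegRow, List.range_succ, List.foldl_append, List.foldl_cons, List.foldl_nil, hf]
  congr 1
  omega

theorem zeroSegRow_spec (L : Nat) : ∀ (off : Nat) (row : List Int), off + L ≤ row.length →
    zeroSegRow row off L = row.take off ++ List.replicate L 0 ++ row.drop (off + L) := by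
  induction L with
  | zero => intro off row h; simp [zeroSegRow]
  | succ L ih =>
    intro off row h
    rw [zeroSegRow_succ, ih (off + 1) row (by omega)]
    have hoff : off < row.length := by omega
    have hlen1 : off < (row.take (off + 1)).length := by
      simp [List.length_take]; omega
    have hlen2 : off < (List.take (off + 1) row ++ List.replicate L (0:Int)).length := by
      simp [List.length_take]; omega
    rw [List.set_append, if_pos hlen2, List.set_append, if_pos hlen1]
    rw [List.take_succ]
    have hget : row[off]?.toList = [row[off]] := by
      simp [List.getElem?_eq_getElem hoff]
    rw [hget]
    have hset : (row.take off ++ [row[off]]).set off 0 = row.take off ++ [0] := by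
      rw [List.set_append]
      simp [List.length_take, Nat.min_eq_left (by omega : off ≤ row.length)]
    rw [hset, show off + 1 + L = off + (L + 1) from by omega]
    simp [List.replicate_succ]

theorem appRunsRow_ones (R : List (Int × Nat)) : ∀ (pre : List Int),
    appRunsRow (pre ++ List.replicate (sumLens R) 1) pre.length R = pre ++ maskRow R := by
  induction R with
  | nil => intro pre; simp [appRunsRow, maskRow, sumLens]
  | cons p rs ih =>
    intro pre
    obtain ⟨v, s⟩ := p
    have hsum : sumLens ((v, s) :: rs) = s + sumLens rs := by simp [sumLens]
    rw [hsum, List.replicate_add]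
    by_cases h3 : 3 ≤ s
    · simp only [appRunsRow, h3, if_true]
      have hz : zeroSegRow (pre ++ (List.replicate s 1 ++ List.replicate (sumLens rs) 1)) pre.length s
          = pre ++ List.replicate s 0 ++ List.replicate (sumLens rs) (1 : Int) := by
        rw [zeroSegRow_spec s pre.length _ (by simp)]
        have h1 : (pre ++ (List.replicate s (1:Int) ++ List.replicate (sumLens rs) 1)).take pre.length = pre := by
          rw [List.take_append_of_le_length (le_refl _)]
          simp
        have h2 : (pre ++ (List.replicate s (1:Int) ++ List.replicate (sumLens rs) 1)).drop (pre.length + s)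
            = List.replicate (sumLens rs) (1 : Int) := by
          have : pre ++ (List.replicate s (1:Int) ++ List.replicate (sumLens rs) 1)
              = (pre ++ List.replicate s 1) ++ List.replicate (sumLens rs) 1 := by simp
          rw [this]
          have hl : (pre ++ List.replicate s (1:Int)).length = pre.length + s := by simp
          rw [← hl, List.drop_left]
        rw [h1, h2]
      rw [hz]
      have hthis := ih (pre ++ List.replicate s 0)
      have hl : (pre ++ List.replicate s (0:Int)).length = pre.length + s := by simp
      rw [hl] at hthis
      rw [hthis]
      simp [maskRow, h3]
    · simp only [appRunsRow, h3, if_false]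
      have hthis := ih (pre ++ List.replicate s 1)
      have hl : (pre ++ List.replicate s (1:Int)).length = pre.length + s := by simp
      rw [hl] at hthis
      rw [← List.append_assoc]
      rw [hthis]
      simp [maskRow, h3]

/- ---------- the horizontal scan ---------- -/

theorem hrow_core (i : Nat) (rest : List Int) (hne : rest ≠ []) :
    ∀ (c : Int) (s off : Nat) (mt : List (List Int)) (eff : List (Int × Int)),
    ∃ b, pvHRow i rest (off + s) (off + s + rest.length) c s mt eff
      = (b, appRuns i off (mRuns c s rest) mt, eff ++ effOf (mRuns c s rest)) := by
  induction rest with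
  | nil => exact absurd rfl hne
  | cons x rest' ih =>
    intro c s off mt eff
    by_cases hbc : c = x
    · subst hbc
      by_cases hre : rest' = []
      · subst hre
        have hcond : ((off + s) == off + s + [c].length - 1) = true := by simp
        by_cases h3 : 3 ≤ s + 1
        · refine ⟨c, ?_⟩
          simp only [List.length_cons, List.length_nil] at hcond
          simp only [pvHRow, beq_self_eq_true, if_true, List.length_cons, List.length_nil,
            hcond, h3, if_true, mRuns]
          refine Prod.ext rfl (Prod.ext ?_ ?_)
          · simp only [appRuns, h3, if_true, zeroSeg]
            try rfl
          · simp [effOf, h3]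
        · refine ⟨c, ?_⟩
          simp only [List.length_cons, List.length_nil] at hcond
          simp only [pvHRow, beq_self_eq_true, if_true, List.length_cons, List.length_nil,
            hcond, h3, if_false, mRuns]
          refine Prod.ext rfl (Prod.ext ?_ ?_)
          · simp [appRuns, h3]
          · simp [effOf, h3]
      · have hne' : rest' ≠ [] := hre
        have hcond : ((off + s) == off + s + (c :: rest').length - 1) = false := by
          simp only [List.length_cons, beq_eq_false_iff_ne]
          have := List.length_pos_iff.mpr hne'
          omega
        simp only [pvHRow, beq_self_eq_true, if_true, hcond, Bool.false_eq_true, if_false, mRuns,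
          beq_self_eq_true]
        have heq2 : off + s + (c :: rest').length = off + (s + 1) + rest'.length := by
          simp; omega
        rw [heq2, show off + s + 1 = off + (s + 1) from by omega]
        exact ih hne' c (s + 1) off mt eff
    · have hb : (c == x) = false := by simp [hbc]
      have hmask : ∀ m0 : List (List Int),
          (List.range s).foldl (fun acc k => pvSetCell acc i (off + s - k - 1)) m0
            = zeroSeg m0 i off s := by
        intro m0
        simp only [zeroSeg]
        congr 1
        funext acc k
        congr 1
        omega
      by_cases hre : rest' = []
      · subst hre
        by_cases h3 : 3 ≤ s
        · refine ⟨x, ?_⟩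
          simp only [pvHRow, hb, Bool.false_eq_true, if_false, h3, if_true, mRuns]
          refine Prod.ext rfl (Prod.ext ?_ ?_)
          · rw [hmask mt]
            simp [appRuns, h3, show ¬ (3:Nat) ≤ 1 from by omega]
          · simp [effOf, h3, show ¬ (3:Nat) ≤ 1 from by omega]
        · refine ⟨x, ?_⟩
          simp only [pvHRow, hb, Bool.false_eq_true, if_false, h3, if_false, mRuns]
          refine Prod.ext rfl (Prod.ext ?_ ?_)
          · simp [appRuns, h3, show ¬ (3:Nat) ≤ 1 from by omega]
          · simp [effOf, h3, show ¬ (3:Nat) ≤ 1 from by omega]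
      · have hne' : rest' ≠ [] := hre
        have heq2 : off + s + (x :: rest').length = (off + s) + 1 + rest'.length := by
          simp; omega
        by_cases h3 : 3 ≤ s
        · simp only [pvHRow, hb, Bool.false_eq_true, if_false, h3, if_true, mRuns]
          rw [heq2, hmask mt]
          obtain ⟨b, hb2⟩ := ih hne' x 1 (off + s) (zeroSeg mt i off s) (eff ++ [(c, (s : Int))])
          refine ⟨b, ?_⟩
          rw [hb2]
          simp [appRuns, effOf, h3]
        · simp only [pvHRow, hb, Bool.false_eq_true, if_false, h3, if_false, mRuns]
          rw [heq2]
          obtain ⟨b, hb2⟩ := ih hne' x 1 (off + s) mt eff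
          refine ⟨b, ?_⟩
          rw [hb2]
          simp [appRuns, effOf, h3]

theorem hrow_start (i : Nat) (r : List Int) (hne : r ≠ []) (bt : Int)
    (mt : List (List Int)) (eff : List (Int × Int)) :
    ∃ b, pvHRow i r 0 r.length bt 0 mt eff
      = (b, appRuns i 0 (pvRuns r) mt, eff ++ effOf (pvRuns r)) := by
  cases r with
  | nil => exact absurd rfl hne
  | cons x rest =>
    rw [pvRuns_cons]
    by_cases hre : rest = []
    · subst hre
      by_cases hbx : bt = x
      · subst hbx
        refine ⟨bt, ?_⟩
        simp [pvHRow, mRuns, appRuns, effOf]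
      · have hb : (bt == x) = false := by simp [hbx]
        refine ⟨x, ?_⟩
        simp [pvHRow, hb, mRuns, appRuns, effOf]
    · have hne' : rest ≠ [] := hre
      have hlen : (x :: rest).length = 0 + 1 + rest.length := by simp; omega
      by_cases hbx : bt = x
      · subst hbx
        have hcond : ((0:Nat) == (bt :: rest).length - 1) = false := by
          simp only [List.length_cons, beq_eq_false_iff_ne]
          have := List.length_pos_iff.mpr hne'
          omega
        simp only [pvHRow, beq_self_eq_true, if_true, hcond, Bool.false_eq_true, if_false]
        rw [hlen]
        exact hrow_core i rest hne' bt 1 0 mt eff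
      · have hb : (bt == x) = false := by simp [hbx]
        simp only [pvHRow, hb, Bool.false_eq_true, if_false, show ¬ (3:Nat) ≤ 0 from by omega,
          if_false]
        rw [hlen]
        exact hrow_core i rest hne' x 1 0 mt eff

theorem hrows_spec (n : Nat) (hn : 0 < n) (rows : List (List Int)) :
    ∀ (pre : List (List Int)) (bt : Int) (eff : List (Int × Int)),
    (∀ r ∈ rows, r.length = n) →
    ∃ b, pvHRows rows pre.length bt (pre ++ List.replicate rows.length (List.replicate n 1)) eff
      = (b, pre ++ rows.map (fun r => maskRow (pvRuns r)), eff ++ pvEffets rows) := by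
  induction rows with
  | nil =>
    intro pre bt eff _
    exact ⟨bt, by simp [pvHRows, pvEffets]⟩
  | cons r rs ih =>
    intro pre bt eff hlen
    have hrn : r.length = n := hlen r (by simp)
    have hrne : r ≠ [] := by
      intro h; rw [h] at hrn; simp at hrn; omega
    set mt := pre ++ List.replicate (r :: rs).length (List.replicate n 1) with hmt
    have hilt : pre.length < mt.length := by simp [hmt]
    obtain ⟨b1, h1⟩ := hrow_start pre.length r hrne bt mt eff
    rw [appRuns_set _ _ _ _ hilt] at h1
    have hgetD : mt.getD pre.length [] = List.replicate n 1 := by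
      rw [hmt, List.getD_append_right _ _ _ _ (le_refl _)]
      simp [List.replicate_succ]
    have hrow : appRunsRow (mt.getD pre.length []) 0 (pvRuns r) = maskRow (pvRuns r) := by
      rw [hgetD]
      have := appRunsRow_ones (pvRuns r) []
      rw [sumLens_pvRuns, hrn] at this
      simpa using this
    rw [hrow] at h1
    have hset : mt.set pre.length (maskRow (pvRuns r))
        = (pre ++ [maskRow (pvRuns r)]) ++ List.replicate rs.length (List.replicate n 1) := by
      rw [hmt, List.set_append, if_neg (by omega)]
      simp [List.replicate_succ]
    rw [hset] at h1
    obtain ⟨b2, h2⟩ := ih (pre ++ [maskRow (pvRuns r)]) b1 (eff ++ effOf (pvRuns r))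
      (fun q hq => hlen q (by simp [hq]))
    refine ⟨b2, ?_⟩
    simp only [pvHRows, h1]
    have hpl : (pre ++ [maskRow (pvRuns r)]).length = pre.length + 1 := by simp
    rw [← hpl, h2]
    refine Prod.ext rfl (Prod.ext ?_ ?_)
    · simp
    · simp [pvEffets, effOf]

/- ---------- transposition ---------- -/

-- cell (r, c) of a matrix, and a cell-wise extensionality principle
def cellM (A : List (List Int)) (r c : Nat) : Int := (A.getD r []).getD c 0

theorem matrix_ext (A B : List (List Int)) (h1 : A.length = B.length)
    (h2 : ∀ i, i < A.length → (A.getD i []).length = (B.getD i []).length)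
    (h3 : ∀ i j, i < A.length → j < (A.getD i []).length → cellM A i j = cellM B i j) :
    A = B := by
  apply List.ext_getElem h1
  intro i hi1 hi2
  have eA : A[i]'hi1 = A.getD i [] := (List.getD_eq_getElem A [] hi1).symm
  have eB : B[i]'hi2 = B.getD i [] := (List.getD_eq_getElem B [] hi2).symm
  rw [eA, eB]
  apply List.ext_getElem (h2 i hi1)
  intro j hj1 hj2
  have := h3 i j hi1 hj1
  simp only [cellM] at this
  rw [List.getD_eq_getElem _ _ hj1, List.getD_eq_getElem _ _ hj2] at this
  exact this

theorem Tr_length (X : List (List Int)) (w : Nat) : (Tr X w).length = w := by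
  simp [Tr]

theorem Tr_getD (X : List (List Int)) (w c : Nat) (hc : c < w) :
    (Tr X w).getD c [] = X.map (fun row => row.getD c 0) := by
  rw [List.getD_eq_getElem _ _ (by simp [Tr]; exact hc)]
  simp [Tr]

theorem Tr_rowlen (X : List (List Int)) (w c : Nat) (hc : c < w) :
    ((Tr X w).getD c []).length = X.length := by
  rw [Tr_getD X w c hc]; simp

theorem cell_Tr (X : List (List Int)) (w c r : Nat) (hc : c < w) (hr : r < X.length) :
    cellM (Tr X w) c r = cellM X r c := by
  simp only [cellM]
  rw [Tr_getD X w c hc, List.getD_eq_getElem _ _ (by simpa using hr), List.getElem_map,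
    List.getD_eq_getElem _ _ hr]

theorem Tr_mem_length (X : List (List Int)) (w : Nat) : ∀ r ∈ Tr X w, r.length = X.length := by
  intro r hr
  simp only [Tr, List.mem_map, List.mem_range] at hr
  obtain ⟨c, _, rfl⟩ := hr
  simp

theorem getD_rowlen_of_mem (A : List (List Int)) (n i : Nat) (h : ∀ r ∈ A, r.length = n)
    (hi : i < A.length) : (A.getD i []).length = n := by
  rw [List.getD_eq_getElem _ _ hi]
  exact h _ (List.getElem_mem hi)

theorem Tr_Tr (X : List (List Int)) (w : Nat) (hw : ∀ r ∈ X, r.length = w) :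
    Tr (Tr X w) X.length = X := by
  apply matrix_ext
  · simp [Tr]
  · intro i hi
    have hiX : i < X.length := by simpa [Tr] using hi
    rw [Tr_rowlen _ _ _ hiX, Tr_length]
    exact (getD_rowlen_of_mem X w i hw hiX).symm
  · intro i j hi hj
    have hiX : i < X.length := by simpa [Tr] using hi
    have hjw : j < w := by
      rw [Tr_rowlen _ _ _ hiX, Tr_length] at hj
      exact hj
    rw [cell_Tr _ _ _ _ hiX (by rw [Tr_length]; exact hjw), cell_Tr _ _ _ _ hjw hiX]

theorem pvSetCell_length (mt : List (List Int)) (x y : Nat) :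
    (pvSetCell mt x y).length = mt.length := by
  simp [pvSetCell]

theorem pvSetCell_getD (mt : List (List Int)) (x y r : Nat) (hx : x < mt.length) :
    (pvSetCell mt x y).getD r [] = if r = x then (mt.getD x []).set y 0 else mt.getD r [] := by
  show (mt.set x ((mt.getD x []).set y 0)).getD r [] = _
  rw [getD_set]
  by_cases hr : r = x
  · simp [hr, hx]
  · simp [hr]

theorem pvSetCell_rowlen (mt : List (List Int)) (x y r : Nat) (hx : x < mt.length) :
    ((pvSetCell mt x y).getD r []).length = (mt.getD r []).length := by
  rw [pvSetCell_getD mt x y r hx]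
  by_cases hr : r = x
  · subst hr; simp
  · simp [hr]

theorem cell_pvSetCell (mt : List (List Int)) (x y r c : Nat) (hx : x < mt.length)
    (hy : y < (mt.getD x []).length) :
    cellM (pvSetCell mt x y) r c = if r = x ∧ c = y then 0 else cellM mt r c := by
  simp only [cellM]
  rw [pvSetCell_getD mt x y r hx]
  by_cases hr : r = x
  · subst hr
    rw [if_pos rfl, getD_set]
    by_cases hc : c = y
    · subst hc; rw [if_pos ⟨rfl, hy⟩, if_pos ⟨rfl, rfl⟩]
    · rw [if_neg (by tauto), if_neg (by tauto)]
  · rw [if_neg hr, if_neg (by tauto)]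

theorem pvSetCell_mem_length (mt : List (List Int)) (x y n : Nat) (hx : x < mt.length)
    (h : ∀ r ∈ mt, r.length = n) : ∀ r ∈ pvSetCell mt x y, r.length = n := by
  intro r hr
  rcases List.mem_or_eq_of_mem_set hr with h1 | h1
  · exact h r h1
  · subst h1
    rw [List.length_set, List.getD_eq_getElem _ _ hx]
    exact h _ (List.getElem_mem hx)

theorem Tr_set (X : List (List Int)) (q a b : Nat) (hq : ∀ r ∈ X, r.length = q)
    (ha : a < X.length) (hb : b < q) :
    Tr (pvSetCell X a b) q = pvSetCell (Tr X q) b a := by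
  have hrowa : (X.getD a []).length = q := getD_rowlen_of_mem X q a hq ha
  have hba : b < (X.getD a []).length := by omega
  have hbT : b < (Tr X q).length := by rw [Tr_length]; exact hb
  have haT : a < ((Tr X q).getD b []).length := by rw [Tr_rowlen _ _ _ hb]; exact ha
  apply matrix_ext
  · rw [Tr_length, pvSetCell_length, Tr_length]
  · intro i hi
    have hiq : i < q := by simpa [Tr_length] using hi
    rw [Tr_rowlen _ _ _ hiq, pvSetCell_length, pvSetCell_rowlen _ _ _ _ hbT,
      Tr_rowlen _ _ _ hiq]
  · intro i j hi hj
    have hiq : i < q := by simpa [Tr_length] using hi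
    have hjX : j < X.length := by
      rw [Tr_rowlen _ _ _ hiq, pvSetCell_length] at hj
      exact hj
    rw [cell_Tr _ _ _ _ hiq (by rw [pvSetCell_length]; exact hjX)]
    rw [cell_pvSetCell X a b j i ha hba]
    rw [cell_pvSetCell (Tr X q) b a i j hbT haT]
    rw [cell_Tr _ _ _ _ hiq hjX]
    by_cases h1 : j = a ∧ i = b
    · simp [h1]
    · rw [if_neg h1, if_neg (by tauto)]

/- ---------- the vertical scan as a horizontal scan of the transpose ---------- -/

theorem foldV_shape (i : Nat) (pos : Nat → Nat) (n M : Nat) (ks : List Nat)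
    (hpos : ∀ k ∈ ks, pos k < M) :
    ∀ mt : List (List Int), mt.length = M → (∀ r ∈ mt, r.length = n) →
    (ks.foldl (fun a k => pvSetCell a (pos k) i) mt).length = M ∧
    (∀ r ∈ ks.foldl (fun a k => pvSetCell a (pos k) i) mt, r.length = n) := by
  induction ks with
  | nil => intro mt h1 h2; exact ⟨h1, h2⟩
  | cons k ks ih =>
    intro mt h1 h2
    simp only [List.foldl_cons]
    exact ih (fun q hq => hpos q (by simp [hq])) _
      (by rw [pvSetCell_length]; exact h1)
      (pvSetCell_mem_length mt (pos k) i n (by rw [h1]; exact hpos k (by simp)) h2)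

theorem Tr_foldSet (i : Nat) (pos : Nat → Nat) (n M : Nat) (hin : i < n) (L : Nat)
    (hpos : ∀ k, k < L → pos k < M) :
    ∀ mt : List (List Int), mt.length = M → (∀ r ∈ mt, r.length = n) →
    Tr ((List.range L).foldl (fun a k => pvSetCell a (pos k) i) mt) n
      = (List.range L).foldl (fun a k => pvSetCell a i (pos k)) (Tr mt n) := by
  induction L with
  | zero => intro mt _ _; simp
  | succ L ih =>
    intro mt h1 h2
    have hsh := foldV_shape i pos n M (List.range L)
      (fun k hk => hpos k (by simp at hk; omega)) mt h1 h2
    rw [List.range_succ, List.foldl_append, List.foldl_cons, List.foldl_nil,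
      List.foldl_append, List.foldl_cons, List.foldl_nil]
    rw [Tr_set _ n (pos L) i hsh.2 (by rw [hsh.1]; exact hpos L (by omega)) hin]
    rw [ih (fun k hk => hpos k (by omega)) mt h1 h2]

theorem vcol_as_hrow (i n M : Nat) (hin : i < n) (rows : List (List Int)) :
    ∀ (j : Nat) (bt : Int) (nb : Nat) (mt : List (List Int)) (eff : List (Int × Int)),
    j + rows.length = M → mt.length = M → (∀ r ∈ mt, r.length = n) →
    pvVCol i rows j M bt nb mt eff
      = ((pvHRow i (rows.map (fun r => r.getD i 0)) j M bt nb (Tr mt n) eff).1,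
         Tr (pvHRow i (rows.map (fun r => r.getD i 0)) j M bt nb (Tr mt n) eff).2.1 M,
         (pvHRow i (rows.map (fun r => r.getD i 0)) j M bt nb (Tr mt n) eff).2.2) := by
  induction rows with
  | nil =>
    intro j bt nb mt eff hJ hL hR
    simp only [pvVCol, pvHRow, List.map_nil]
    rw [show M = mt.length from hL.symm, Tr_Tr mt n hR]
  | cons r rows' ih =>
    intro j bt nb mt eff hJ hL hR
    have hjM : j < M := by simp at hJ; omega
    have hTT : Tr (Tr mt n) M = mt := by
      rw [show M = mt.length from hL.symm, Tr_Tr mt n hR]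
    by_cases hre : rows' = []
    · subst hre
      have hcond : (j == M - 1) = true := by
        simp only [beq_iff_eq]; simp at hJ; omega
      by_cases hbc : (bt == r.getD i 0) = true
      · by_cases h3 : 3 ≤ nb + 1
        · simp only [pvVCol, pvHRow, List.map_cons, List.map_nil, hbc, if_true, hcond, h3]
          have hflu := Tr_foldSet i (fun k => j - k) n M hin (nb + 1)
            (fun k _ => by show j - k < M; omega) mt hL hR
          have hsh := foldV_shape i (fun k => j - k) n M (List.range (nb + 1))
            (fun k _ => by show j - k < M; omega) mt hL hR
          dsimp only [] at hflu hsh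
          refine Prod.ext rfl (Prod.ext ?_ rfl)
          have h4 := Tr_Tr _ n hsh.2
          rw [hsh.1, hflu] at h4
          exact h4.symm
        · simp only [pvVCol, pvHRow, List.map_cons, List.map_nil, hbc, if_true, hcond, h3,
            if_false]
          rw [hTT]
      · simp only [Bool.not_eq_true] at hbc
        by_cases h3 : 3 ≤ nb
        · simp only [pvVCol, pvHRow, List.map_cons, List.map_nil, hbc, Bool.false_eq_true,
            if_false, h3, if_true]
          have hflu := Tr_foldSet i (fun k => j - k - 1) n M hin nb
            (fun k _ => by show j - k - 1 < M; omega) mt hL hR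
          have hsh := foldV_shape i (fun k => j - k - 1) n M (List.range nb)
            (fun k _ => by show j - k - 1 < M; omega) mt hL hR
          dsimp only [] at hflu hsh
          refine Prod.ext rfl (Prod.ext ?_ rfl)
          have h4 := Tr_Tr _ n hsh.2
          rw [hsh.1, hflu] at h4
          exact h4.symm
        · simp only [pvVCol, pvHRow, List.map_cons, List.map_nil, hbc, Bool.false_eq_true,
            if_false, h3]
          rw [hTT]
    · have hcond : (j == M - 1) = false := by
        simp only [beq_eq_false_iff_ne]
        have := List.length_pos_iff.mpr hre
        simp at hJ
        omega
      by_cases hbc : (bt == r.getD i 0) = true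
      · simp only [pvVCol, pvHRow, List.map_cons, hbc, if_true, hcond, Bool.false_eq_true,
          if_false]
        exact ih (j + 1) bt (nb + 1) mt eff (by simp at hJ ⊢; omega) hL hR
      · simp only [Bool.not_eq_true] at hbc
        by_cases h3 : 3 ≤ nb
        · simp only [pvVCol, pvHRow, List.map_cons, hbc, Bool.false_eq_true, if_false, h3,
            if_true]
          have hflu := Tr_foldSet i (fun k => j - k - 1) n M hin nb
            (fun k _ => by show j - k - 1 < M; omega) mt hL hR
          have hsh := foldV_shape i (fun k => j - k - 1) n M (List.range nb)
            (fun k _ => by show j - k - 1 < M; omega) mt hL hR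
          dsimp only [] at hflu hsh
          rw [← hflu]
          exact ih (j + 1) (r.getD i 0) 1
            ((List.range nb).foldl (fun a k => pvSetCell a (j - k - 1) i) mt)
            (eff ++ [(bt, (nb : Int))]) (by simp at hJ ⊢; omega) hsh.1 hsh.2
        · simp only [pvVCol, pvHRow, List.map_cons, hbc, Bool.false_eq_true, if_false, h3]
          exact ih (j + 1) (r.getD i 0) 1 mt eff (by simp at hJ ⊢; omega) hL hR

theorem vcols_spec (matrice : List (List Int)) (M n : Nat) (hM : matrice.length = M)
    (hM0 : 0 < M) (hrect : ∀ r ∈ matrice, r.length = n) :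
    ∀ (cnt i : Nat) (pre : List (List Int)) (bt : Int) (eff : List (Int × Int)),
    pre.length = i → i + cnt = n → (∀ r ∈ pre, r.length = M) →
    ∃ b, pvVCols matrice cnt i bt (Tr (pre ++ List.replicate cnt (List.replicate M 1)) M) eff
      = (b,
         Tr (pre ++ ((List.range' i cnt).map (fun c => matrice.map (fun row => row.getD c 0))).map
              (fun col => maskRow (pvRuns col))) M,
         eff ++ pvEffets ((List.range' i cnt).map (fun c => matrice.map (fun row => row.getD c 0)))) := by
  intro cnt
  induction cnt with
  | zero =>
    intro i pre bt eff hpl hicnt hpreM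
    refine ⟨bt, ?_⟩
    simp [pvVCols, pvEffets]
  | succ cnt ihc =>
    intro i pre bt eff hpl hicnt hpreM
    have hil : i < n := by omega
    have hWlen : (pre ++ List.replicate (cnt + 1) (List.replicate M 1)).length = n := by
      simp [hpl]; omega
    have hWrows : ∀ r ∈ pre ++ List.replicate (cnt + 1) (List.replicate M 1),
        r.length = M := by
      intro r hr
      rcases List.mem_append.mp hr with h | h
      · exact hpreM r h
      · rw [List.eq_of_mem_replicate h]; simp
    have hmtT_rows : ∀ r ∈ Tr (pre ++ List.replicate (cnt + 1) (List.replicate M 1)) M,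
        r.length = n := by
      intro r hr
      rw [Tr_mem_length _ M r hr, hWlen]
    have hstep := vcol_as_hrow i n M hil matrice 0 bt 0
      (Tr (pre ++ List.replicate (cnt + 1) (List.replicate M 1)) M) eff
      (by simpa using hM) (Tr_length _ M) hmtT_rows
    have hTrW : Tr (Tr (pre ++ List.replicate (cnt + 1) (List.replicate M 1)) M) n
        = pre ++ List.replicate (cnt + 1) (List.replicate M 1) := by
      have := Tr_Tr _ M hWrows
      rw [hWlen] at this
      exact this
    rw [hTrW] at hstep
    have hcolne : matrice.map (fun (row : List Int) => row.getD i 0) ≠ [] := by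
      intro hcc
      have : matrice.length = 0 := by simpa using congrArg List.length hcc
      omega
    obtain ⟨b1, h1⟩ := hrow_start i (matrice.map (fun (row : List Int) => row.getD i 0)) hcolne bt
      (pre ++ List.replicate (cnt + 1) (List.replicate M 1)) eff
    have hcollen : (matrice.map (fun (row : List Int) => row.getD i 0)).length = M := by simp [hM]
    rw [hcollen] at h1
    rw [appRuns_set _ _ _ _ (by rw [hWlen]; omega)] at h1
    have hgetD : (pre ++ List.replicate (cnt + 1) (List.replicate M 1)).getD i []
        = List.replicate M 1 := by
      rw [← hpl, List.getD_append_right _ _ _ _ (le_refl _)]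
      simp [List.replicate_succ]
    have hrowmask : appRunsRow
        ((pre ++ List.replicate (cnt + 1) (List.replicate M 1)).getD i []) 0
        (pvRuns (matrice.map (fun (row : List Int) => row.getD i 0)))
        = maskRow (pvRuns (matrice.map (fun (row : List Int) => row.getD i 0))) := by
      rw [hgetD]
      have := appRunsRow_ones (pvRuns (matrice.map (fun (row : List Int) => row.getD i 0))) []
      rw [sumLens_pvRuns, hcollen] at this
      simpa using this
    rw [hrowmask] at h1
    have hset : (pre ++ List.replicate (cnt + 1) (List.replicate M 1)).set i
        (maskRow (pvRuns (matrice.map (fun (row : List Int) => row.getD i 0))))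
        = (pre ++ [maskRow (pvRuns (matrice.map (fun (row : List Int) => row.getD i 0)))])
            ++ List.replicate cnt (List.replicate M 1) := by
      rw [← hpl, List.set_append, if_neg (by omega)]
      simp [List.replicate_succ]
    rw [hset] at h1
    rw [h1] at hstep
    have hmask_len : (maskRow (pvRuns (matrice.map (fun (row : List Int) => row.getD i 0)))).length = M := by
      rw [length_maskRow, sumLens_pvRuns, hcollen]
    obtain ⟨b2, h2⟩ := ihc (i + 1)
      (pre ++ [maskRow (pvRuns (matrice.map (fun (row : List Int) => row.getD i 0)))]) b1
      (eff ++ effOf (pvRuns (matrice.map (fun (row : List Int) => row.getD i 0))))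
      (by simp [hpl]) (by omega)
      (by
        intro q hq
        rcases List.mem_append.mp hq with h | h
        · exact hpreM q h
        · simp only [List.mem_singleton] at h
          rw [h]
          exact hmask_len)
    refine ⟨b2, ?_⟩
    simp only [pvVCols, hM, hstep]
    rw [h2]
    refine Prod.ext rfl (Prod.ext ?_ ?_)
    · simp only [List.range'_succ, List.map_cons]
      congr 1
      simp
    · simp only [List.range'_succ, List.map_cons]
      simp [pvEffets, effOf]

/- ---------- the final multiplication loop ---------- -/

theorem foldl_range_set {α : Type} (d : α) (f : Nat → α → α) (B : List α → Nat → List α)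
    (hB : ∀ (acc : List α) (i : Nat), i < acc.length → B acc i = acc.set i (f i (acc.getD i d))) :
    ∀ (k : Nat) (l : List α), k ≤ l.length →
    (List.range k).foldl B l = l.mapIdx (fun i x => if i < k then f i x else x) := by
  intro k
  induction k with
  | zero =>
    intro l _
    apply List.ext_getElem (by simp)
    intro i h1 h2
    simp
  | succ k ih =>
    intro l hk
    rw [List.range_succ, List.foldl_append, List.foldl_cons, List.foldl_nil]
    rw [ih l (by omega)]
    have hlen : (l.mapIdx fun i x => if i < k then f i x else x).length = l.length := by simp
    rw [hB _ k (by omega)]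
    have hget : (l.mapIdx fun i x => if i < k then f i x else x).getD k d = l[k]'(by omega) := by
      rw [List.getD_eq_getElem _ _ (by omega)]
      simp
    rw [hget]
    apply List.ext_getElem (by simp)
    intro j h1 h2
    rw [List.getElem_set]
    by_cases hjk : k = j
    · subst hjk
      simp
    · rw [if_neg hjk]
      simp only [List.getElem_mapIdx]
      by_cases hjk2 : j < k
      · simp [hjk2, show j < k + 1 from by omega]
      · simp [hjk2, show ¬ j < k + 1 from by omega]

/- ---------- main assembly ---------- -/

theorem horizontal_spec (matrice : List (List Int)) (n : Nat) (hn : 0 < n)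
    (hrect : ∀ r ∈ matrice, r.length = n) (hhead : (matrice.headD []).length = n) :
    pvHorizontal matrice = (matrice.map (fun r => maskRow (pvRuns r)), pvEffets matrice) := by
  obtain ⟨b, hb⟩ := hrows_spec n hn matrice [] ((matrice.headD []).headD 0) [] hrect
  simp only [List.length_nil, List.nil_append] at hb
  simp only [pvHorizontal, hhead]
  rw [hb]

theorem vertical_spec (matrice : List (List Int)) (n : Nat) (hn : 0 < n) (hM0 : 0 < matrice.length)
    (hrect : ∀ r ∈ matrice, r.length = n) (hhead : (matrice.headD []).length = n) :
    pvVertical matrice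
      = (Tr (((List.range n).map (fun c => matrice.map (fun row => row.getD c 0))).map
             (fun col => maskRow (pvRuns col))) matrice.length,
         pvEffets ((List.range n).map (fun c => matrice.map (fun row => row.getD c 0)))) := by
  have hTrRep : Tr (List.replicate n (List.replicate matrice.length (1:Int))) matrice.length
      = List.replicate matrice.length (List.replicate n 1) := by
    simp only [Tr]
    have h1 : ∀ c ∈ List.range matrice.length,
        (List.replicate n (List.replicate matrice.length (1:Int))).map
          (fun row => row.getD c 0) = List.replicate n 1 := by
      intro c hc
      simp only [List.mem_range] at hc
      rw [List.map_replicate]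
      congr 1
      rw [List.getD_eq_getElem _ _ (by simpa using hc)]
      simp
    rw [List.map_congr_left h1]
    apply List.ext_getElem (by simp)
    intro k h1' h2'
    simp
  obtain ⟨b, hb⟩ := vcols_spec matrice matrice.length n rfl hM0 hrect n 0 []
    ((matrice.headD []).headD 0) [] rfl (by omega) (by simp)
  simp only [List.nil_append] at hb
  rw [hTrRep] at hb
  simp only [pvVertical, hhead]
  rw [hb]
  rw [show List.range' 0 n = List.range n from List.range_eq_range'.symm]

theorem main_equiv (matrice : List (List Int)) (h : Pre_combinaison_de_matrice matrice) :
    combinaison_de_matrice matrice = combinaison_de_matrice_alt matrice := by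
  obtain ⟨hne, hhne, hrect⟩ := h
  have hM0 : 0 < matrice.length := List.length_pos_iff.mpr hne
  have hn : 0 < (matrice.headD []).length := List.length_pos_iff.mpr hhne
  have hH := horizontal_spec matrice _ hn hrect rfl
  have hV := vertical_spec matrice _ hn hM0 hrect rfl
  simp only [combinaison_de_matrice, combinaison_de_matrice_alt, hH, hV]
  refine Prod.ext ?_ rfl
  have houter := foldl_range_set ([] : List Int)
    (fun i row => (List.range row.length).foldl
      (fun r j => r.set j ((r.getD j 0)
        * ((matrice.map (fun r0 => maskRow (pvRuns r0))).getD i []).getD j 0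
        * ((Tr (((List.range (matrice.headD []).length).map
            (fun c => matrice.map (fun row0 => row0.getD c 0))).map
            (fun col => maskRow (pvRuns col))) matrice.length).getD i []).getD j 0)) row)
    (fun acc i => (List.range ((acc.getD i []).length)).foldl
      (fun a2 j => a2.set i ((a2.getD i []).set j
        ((a2.getD i []).getD j 0
         * ((matrice.map (fun r0 => maskRow (pvRuns r0))).getD i []).getD j 0
         * ((Tr (((List.range (matrice.headD []).length).map
            (fun c => matrice.map (fun row0 => row0.getD c 0))).map
            (fun col => maskRow (pvRuns col))) matrice.length).getD i []).getD j 0))) acc)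
    (fun acc i hi => foldl_set_row _
      (fun r j => r.set j ((r.getD j 0)
        * ((matrice.map (fun r0 => maskRow (pvRuns r0))).getD i []).getD j 0
        * ((Tr (((List.range (matrice.headD []).length).map
            (fun c => matrice.map (fun row0 => row0.getD c 0))).map
            (fun col => maskRow (pvRuns col))) matrice.length).getD i []).getD j 0))
      acc i hi)
    matrice.length matrice (le_refl _)
  rw [houter]
  dsimp only
  apply List.ext_getElem (by simp)
  intro i hi1 hi2
  have hilen : i < matrice.length := by simpa using hi2
  have hrowD : matrice.getD i [] = matrice[i]'hilen := List.getD_eq_getElem matrice [] hilen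
  have hrlenn : (matrice[i]'hilen).length = (matrice.headD []).length :=
    hrect _ (List.getElem_mem hilen)
  rw [List.getElem_mapIdx, if_pos hilen]
  have hinner := foldl_range_set (0 : Int)
    (fun j x => x
      * ((matrice.map (fun r0 => maskRow (pvRuns r0))).getD i []).getD j 0
      * ((Tr (((List.range (matrice.headD []).length).map
          (fun c => matrice.map (fun row0 => row0.getD c 0))).map
          (fun col => maskRow (pvRuns col))) matrice.length).getD i []).getD j 0)
    (fun r j => r.set j ((r.getD j 0)
      * ((matrice.map (fun r0 => maskRow (pvRuns r0))).getD i []).getD j 0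
      * ((Tr (((List.range (matrice.headD []).length).map
          (fun c => matrice.map (fun row0 => row0.getD c 0))).map
          (fun col => maskRow (pvRuns col))) matrice.length).getD i []).getD j 0))
    (fun r j hj => rfl)
    ((matrice[i]'hilen).length) (matrice[i]'hilen) (le_refl _)
  rw [hinner]
  rw [List.getElem_map, List.getElem_range]
  apply List.ext_getElem
  · simp [List.getElem?_eq_getElem hilen]
  intro j hj1 hj2
  have hjlen : j < (matrice[i]'hilen).length := by simpa using hj1
  have hjn : j < (matrice.headD []).length := by omega
  rw [List.getElem_mapIdx, if_pos hjlen, List.getElem_map, List.getElem_range]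
  beta_reduce
  -- the four mask/keep facts
  have hcolj : ∀ (hh : j < ((List.range (matrice.headD []).length).map
      (fun c => matrice.map (fun row0 => row0.getD c 0))).length),
      ((List.range (matrice.headD []).length).map
        (fun c => matrice.map (fun row0 => row0.getD c 0)))[j]'hh
      = matrice.map (fun row0 => row0.getD j 0) := by
    intro hh
    simp only [List.getElem_map, List.getElem_range]
  have hcollen : (matrice.map (fun row0 => row0.getD j 0)).length = matrice.length := by simp
  have hkeeprow : (pvKeep (matrice[i]'hilen)).length = (matrice[i]'hilen).length :=
    length_pvKeep _
  have hkeepcol : (pvKeep (matrice.map (fun row0 => row0.getD j 0))).length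
      = matrice.length := by rw [length_pvKeep]; exact hcollen
  -- HM
  have hHM : ((matrice.map (fun r0 => maskRow (pvRuns r0))).getD i []).getD j 0
      = if (pvKeep (matrice[i]'hilen))[j]'(by omega) then 1 else 0 := by
    have h1 : i < (matrice.map (fun r0 => maskRow (pvRuns r0))).length := by
      simpa using hilen
    rw [List.getD_eq_getElem _ _ h1]
    simp only [List.getElem_map]
    rw [maskRow_eq_keep]
    have h2 : j < (((pvRuns (matrice[i]'hilen)).flatMap
        (fun p => List.replicate p.2 (decide (p.2 < 3)))).map
        (fun b => if b then (1:Int) else 0)).length := by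
      have hh : ((pvRuns (matrice[i]'hilen)).flatMap
          (fun p => List.replicate p.2 (decide (p.2 < 3)))) = pvKeep (matrice[i]'hilen) := rfl
      rw [List.length_map, hh, length_pvKeep]; exact hjlen
    rw [List.getD_eq_getElem _ _ h2]
    simp only [List.getElem_map]
    rfl
  -- VM
  have hVM : ((Tr (((List.range (matrice.headD []).length).map
      (fun c => matrice.map (fun row0 => row0.getD c 0))).map
      (fun col => maskRow (pvRuns col))) matrice.length).getD i []).getD j 0
      = if (pvKeep (matrice.map (fun row0 => row0.getD j 0)))[i]'(by omega) then 1 else 0 := by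
    have hXlen : (((List.range (matrice.headD []).length).map
        (fun c => matrice.map (fun row0 => row0.getD c 0))).map
        (fun col => maskRow (pvRuns col))).length = (matrice.headD []).length := by simp
    have hcell : ((Tr (((List.range (matrice.headD []).length).map
        (fun c => matrice.map (fun row0 => row0.getD c 0))).map
        (fun col => maskRow (pvRuns col))) matrice.length).getD i []).getD j 0
        = cellM (Tr (((List.range (matrice.headD []).length).map
            (fun c => matrice.map (fun row0 => row0.getD c 0))).map
            (fun col => maskRow (pvRuns col))) matrice.length) i j := rfl
    rw [hcell, cell_Tr _ _ _ _ hilen (by rw [hXlen]; exact hjn)]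
    simp only [cellM]
    have h1 : j < (((List.range (matrice.headD []).length).map
        (fun c => matrice.map (fun row0 => row0.getD c 0))).map
        (fun col => maskRow (pvRuns col))).length := by rw [hXlen]; exact hjn
    rw [List.getD_eq_getElem _ _ h1]
    simp only [List.getElem_map, List.getElem_range]
    rw [maskRow_eq_keep]
    have h2 : i < (((pvRuns (matrice.map (fun row0 => row0.getD j 0))).flatMap
        (fun p => List.replicate p.2 (decide (p.2 < 3)))).map
        (fun b => if b then (1:Int) else 0)).length := by
      have hh : ((pvRuns (matrice.map (fun row0 => row0.getD j 0))).flatMap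
          (fun p => List.replicate p.2 (decide (p.2 < 3))))
          = pvKeep (matrice.map (fun row0 => row0.getD j 0)) := rfl
      rw [List.length_map, hh, length_pvKeep, hcollen]; exact hilen
    rw [List.getD_eq_getElem _ _ h2]
    simp only [List.getElem_map]
    rfl
  -- kh / kv
  have hKH : ((matrice.map pvKeep).getD i []).getD j true
      = (pvKeep (matrice[i]'hilen))[j]'(by omega) := by
    have h1 : i < (matrice.map pvKeep).length := by simpa using hilen
    rw [List.getD_eq_getElem _ _ h1]
    simp only [List.getElem_map]
    have h2 : j < (pvKeep (matrice[i]'hilen)).length := by omega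
    rw [List.getD_eq_getElem _ _ h2]
  have hKV : ((((List.range (matrice.headD []).length).map
      (fun c => matrice.map (fun row0 => row0.getD c 0))).map pvKeep).getD j []).getD i true
      = (pvKeep (matrice.map (fun row0 => row0.getD j 0)))[i]'(by omega) := by
    have h1 : j < (((List.range (matrice.headD []).length).map
        (fun c => matrice.map (fun row0 => row0.getD c 0))).map pvKeep).length := by
      simpa using hjn
    rw [List.getD_eq_getElem _ _ h1]
    simp only [List.getElem_map, List.getElem_range]
    have h2 : i < (pvKeep (matrice.map (fun row0 => row0.getD j 0))).length := by omega
    rw [List.getD_eq_getElem _ _ h2]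
  rw [hHM, hVM, hKH, hKV, hrowD]
  rw [List.getD_eq_getElem _ _ hjlen]
  by_cases ha : (pvKeep (matrice[i]'hilen))[j]'(by omega) = true
  · by_cases hb : (pvKeep (matrice.map (fun row0 => row0.getD j 0)))[i]'(by omega) = true
    · simp [ha, hb]
    · simp only [Bool.not_eq_true] at hb
      simp [ha, hb]
  · simp only [Bool.not_eq_true] at ha
    simp [ha]

-- ===== VERDICT (by name: the statement is the Claim_ definition above) =====
theorem combinaison_de_matrice_spec : Claim_equal_combinaison_de_matrice := by
  intro matrice _ hpre
  exact main_equiv matrice hpre
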